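-- pv_equiv track=rewrite | github.com/junron/auto-enum | gen/linux/parse_manpages.py | split_on
-- ===== SOURCE A (Python) =====
-- def split_on(text, splitters):
--     out = []
--     cur = ""
--     for line in text.splitlines():
--         if any(line.startswith("." + splitter) for splitter in splitters):
--             if cur:
--                 out.append(cur)
--                 cur = ""
--         elif not line.startswith(".\\"):
--             cur += line + "\n"
--     if cur:
--         out.append(cur)
--     return out
-- ===== SOURCE B (Python) =====
-- def split_on(text, splitters):
--     # group-then-reduce: split the lines into maximal runs of equal
--     # boundary-key, then turn each non-boundary run into one chunk
--     def boundary(line):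
--         return any(line.startswith("." + s) for s in splitters)
--
--     lines = text.splitlines()
--     n = len(lines)
--     out = []
--     i = 0
--     while i < n:
--         key = boundary(lines[i])
--         j = i + 1
--         while j < n and boundary(lines[j]) == key:
--             j += 1
--         if not key:
--             chunk = "".join(line + "\n" for line in lines[i:j]
--                             if not line.startswith(".\\"))
--             if chunk:
--                 out.append(chunk)
--         i = j
--     return out
-- ===== Notes on version B (the rewrite author's own statement) =====
-- stated objective: alternative
-- what changed: Replaced A's running-accumulator-with-flush state machine by a group-then-reduce structure: the lines are first partitioned into maximal runs of equal boundary-key, and each non-boundary run is joined into one chunk.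
import Mathlib
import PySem

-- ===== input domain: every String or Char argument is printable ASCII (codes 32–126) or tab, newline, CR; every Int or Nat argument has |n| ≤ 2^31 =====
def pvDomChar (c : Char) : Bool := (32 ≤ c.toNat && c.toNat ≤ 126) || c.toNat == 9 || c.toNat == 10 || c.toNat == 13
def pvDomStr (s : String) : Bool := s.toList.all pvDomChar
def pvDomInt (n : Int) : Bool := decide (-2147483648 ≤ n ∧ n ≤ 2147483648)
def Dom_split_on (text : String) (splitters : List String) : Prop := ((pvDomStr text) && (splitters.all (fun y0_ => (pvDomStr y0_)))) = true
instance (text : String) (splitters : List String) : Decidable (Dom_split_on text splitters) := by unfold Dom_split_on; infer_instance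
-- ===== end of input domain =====

-- B replaces A's accumulator-with-flush state machine by a group-then-reduce pass
-- over maximal runs of boundary/non-boundary lines (objective: alternative, same cost).
-- Both ports work on List Char (PySem.Chars is exact there) and wrap to String at the end.

-- ===== PORT A =====
-- literal transliteration of A's fold: state (out, cur), flush on boundary, skip ".\" lines
def split_on (text : String) (splitters : List String) : List String :=
  let r := (PySem.Chars.splitlines text.toList).foldl
    (fun (st : List (List Char) × List Char) line =>
      if splitters.any (fun splitter => PySem.Chars.startswith line ('.' :: splitter.toList)) then
        (if st.2 ≠ [] then (st.1 ++ [st.2], ([] : List Char)) else st)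
      else if PySem.Chars.startswith line ['.', '\\'] then st
      else (st.1, st.2 ++ line ++ ['\n'])) ([], [])
  (if r.2 ≠ [] then r.1 ++ [r.2] else r.1).map String.ofList

-- ===== PORT B =====
def pvBoundary (splitters : List String) (line : List Char) : Bool :=
  splitters.any (fun s => PySem.Chars.startswith line ('.' :: s.toList))

-- Source B's grouping while-loop: maximal runs of lines with equal boundary-key
def pvGroups (f : List Char → Bool) : List (List Char) → List (Bool × List (List Char))
  | [] => []
  | x :: xs =>
      (f x, x :: xs.takeWhile (fun y => f y == f x)) ::
        pvGroups f (xs.dropWhile (fun y => f y == f x))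
termination_by l => l.length
decreasing_by
  exact Nat.lt_succ_of_le (List.length_dropWhile_le _ _)

def split_on_alt (text : String) (splitters : List String) : List String :=
  ((pvGroups (pvBoundary splitters) (PySem.Chars.splitlines text.toList)).foldl
    (fun out g =>
      if g.1 then out
      else
        let chunk := PySem.Chars.join []
          ((g.2.filter (fun line => !PySem.Chars.startswith line ['.', '\\'])).map
            (fun line => line ++ ['\n']))
        if chunk ≠ [] then out ++ [chunk] else out) []).map String.ofList

-- ===== PRECONDITION & SPEC =====
def Spec_split_on (text : String) (splitters : List String) (out : List String) : Prop := out = split_on_alt text splitters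
instance (text : String) (splitters : List String) (out : List String) : Decidable (Spec_split_on text splitters out) := by unfold Spec_split_on; infer_instance

-- ===== CLAIM (what is proved, stated in full; the proofs are below) =====
def Claim_equal_split_on : Prop := ∀ (text : String) (splitters : List String), Dom_split_on text splitters → Spec_split_on text splitters (split_on text splitters)

-- ===== LEMMAS AND PROOFS =====

-- common abstract form of both programs: emitted chunks from the remaining lines,
-- given the current accumulator
def pvLoop (b sk : List Char → Bool) : List (List Char) → List Char → List (List Char)
  | [], cur => if cur ≠ [] then [cur] else []
  | l :: ls, cur =>
      if b l then (if cur ≠ [] then cur :: pvLoop b sk ls [] else pvLoop b sk ls [])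
      else if sk l then pvLoop b sk ls cur
      else pvLoop b sk ls (cur ++ l ++ ['\n'])

def pvSk (line : List Char) : Bool := PySem.Chars.startswith line ['.', '\\']

def pvChunk (g : List (List Char)) : List Char :=
  PySem.Chars.join [] ((g.filter (fun line => !pvSk line)).map (fun line => line ++ ['\n']))

theorem pvA_loop (b : List Char → Bool) (lines : List (List Char)) :
    ∀ out cur,
      (let r := lines.foldl
        (fun (st : List (List Char) × List Char) line =>
          if b line then
            (if st.2 ≠ [] then (st.1 ++ [st.2], ([] : List Char)) else st)
          else if pvSk line then st
          else (st.1, st.2 ++ line ++ ['\n'])) (out, cur)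
       (if r.2 ≠ [] then r.1 ++ [r.2] else r.1)) = out ++ pvLoop b pvSk lines cur := by
  induction lines with
  | nil =>
    intro out cur
    simp [pvLoop]
    split <;> simp
  | cons l ls ih =>
    intro out cur
    simp only [List.foldl_cons, pvLoop]
    by_cases hb : b l
    · simp only [hb, if_pos]
      by_cases hc : cur ≠ []
      · simpa [hc, List.append_assoc] using ih (out ++ [cur]) []
      · simp only [ne_eq, not_not] at hc
        simpa [hc] using ih out []
    · simp only [hb, Bool.false_eq_true, if_false]
      by_cases hs : pvSk l
      · simpa [hs] using ih out cur
      · simpa [hs] using ih out (cur ++ l ++ ['\n'])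

theorem pvChunk_nil : pvChunk [] = [] := by
  simp [pvChunk, PySem.Chars.join_nil]

theorem pvJoinNilCons (x : List Char) (xs : List (List Char)) :
    PySem.Chars.join [] (x :: xs) = x ++ PySem.Chars.join [] xs := by
  cases xs with
  | nil => simp [PySem.Chars.join_singleton, PySem.Chars.join_nil]
  | cons y ys => simpa using PySem.Chars.join_cons_cons [] x y ys

theorem pvChunk_cons (l : List Char) (g : List (List Char)) :
    pvChunk (l :: g) = (if pvSk l then pvChunk g else l ++ '\n' :: pvChunk g) := by
  by_cases hs : pvSk l <;> simp [pvChunk, hs, pvJoinNilCons]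

-- a run of boundary lines is skipped by the state machine (empty accumulator)
theorem pvLoop_boundary_run (b : List Char → Bool) (g rest : List (List Char))
    (h : ∀ l ∈ g, b l = true) :
    pvLoop b pvSk (g ++ rest) [] = pvLoop b pvSk rest [] := by
  induction g with
  | nil => rfl
  | cons l ls ih =>
    have hl : b l = true := h l (by simp)
    simp only [List.cons_append, pvLoop, hl, if_pos]
    simpa using ih (fun x hx => h x (by simp [hx]))

-- a run of content lines only grows the accumulator, by exactly its chunk
theorem pvLoop_content_run (b : List Char → Bool) (g : List (List Char))
    (h : ∀ l ∈ g, b l = false) :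
    ∀ cur rest, pvLoop b pvSk (g ++ rest) cur = pvLoop b pvSk rest (cur ++ pvChunk g) := by
  induction g with
  | nil => intro cur rest; simp [pvChunk_nil]
  | cons l ls ih =>
    intro cur rest
    have hl : b l = false := h l (by simp)
    have hrec := ih (fun x hx => h x (by simp [hx]))
    simp only [List.cons_append, pvLoop, hl, Bool.false_eq_true, if_false, pvChunk_cons]
    by_cases hs : pvSk l
    · simp [hs, hrec]
    · simp [hs, hrec, List.append_assoc]

-- flushing at the start of a boundary group (or at the end of input)
theorem pvLoop_flush (b : List Char → Bool) (rest : List (List Char)) (c : List Char)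
    (h : rest = [] ∨ ∃ r rs, rest = r :: rs ∧ b r = true) :
    pvLoop b pvSk rest c = (if c ≠ [] then [c] else []) ++ pvLoop b pvSk rest [] := by
  rcases h with h | ⟨r, rs, hr, hb⟩
  · subst h; simp [pvLoop]
  · subst hr
    simp only [pvLoop, hb, if_pos]
    by_cases hc : c ≠ [] <;> simp [hc]

theorem pvB_loop (b : List Char → Bool) :
    ∀ (n : Nat) (lines : List (List Char)), lines.length ≤ n → ∀ acc,
      (pvGroups b lines).foldl
        (fun out g =>
          if g.1 then out
          else
            let chunk := pvChunk g.2
            if chunk ≠ [] then out ++ [chunk] else out) acc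
      = acc ++ pvLoop b pvSk lines [] := by
  intro n
  induction n with
  | zero =>
    intro lines hlen acc
    have : lines = [] := List.length_eq_zero_iff.mp (Nat.le_zero.mp hlen)
    subst this; simp [pvGroups, pvLoop]
  | succ n ih =>
    intro lines hlen acc
    match lines with
    | [] => simp [pvGroups, pvLoop]
    | x :: xs =>
      rw [pvGroups]
      set p := fun y => b y == b x with hp
      have hsplit : xs.takeWhile p ++ xs.dropWhile p = xs := List.takeWhile_append_dropWhile
      have hdroplen : (xs.dropWhile p).length ≤ n := by
        have := List.length_dropWhile_le p xs
        simp at hlen; omega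
      have hrest : xs.dropWhile p = [] ∨ ∃ r rs, xs.dropWhile p = r :: rs ∧ b r = (!b x) := by
        cases hd : xs.dropWhile p with
        | nil => exact Or.inl rfl
        | cons r rs =>
          refine Or.inr ⟨r, rs, rfl, ?_⟩
          have hne : xs.dropWhile p ≠ [] := by simp [hd]
          have hpr : p r = false := by
            simpa [hd] using List.head_dropWhile_not p hne
          rw [hp] at hpr
          cases hbx : b x <;> cases hbr : b r <;> simp_all
      have htake : ∀ l ∈ xs.takeWhile p, b l = b x := by
        intro l hl
        have := List.mem_takeWhile_imp hl
        simpa [hp] using this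
      rw [List.foldl_cons, ih _ hdroplen]
      cases hbx : b x with
      | true =>
        simp only [if_pos]
        congr 1
        conv_rhs => rw [← hsplit, show x :: (xs.takeWhile p ++ xs.dropWhile p)
              = (x :: xs.takeWhile p) ++ xs.dropWhile p from rfl]
        rw [pvLoop_boundary_run b _ _ (by
          intro l hl
          rcases List.mem_cons.mp hl with h | h
          · subst h; exact hbx
          · rw [htake l h]; exact hbx)]
      | false =>
        simp only [Bool.false_eq_true, if_false]
        have hcontent : ∀ l ∈ x :: xs.takeWhile p, b l = false := by
          intro l hl
          rcases List.mem_cons.mp hl with h | h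
          · subst h; exact hbx
          · rw [htake l h]; exact hbx
        conv_rhs => rw [← hsplit, show x :: (xs.takeWhile p ++ xs.dropWhile p)
              = (x :: xs.takeWhile p) ++ xs.dropWhile p from rfl]
        rw [pvLoop_content_run b _ hcontent [] (xs.dropWhile p), List.nil_append]
        rw [pvLoop_flush b (xs.dropWhile p) (pvChunk (x :: xs.takeWhile p)) (by
          rcases hrest with h | ⟨r, rs, hr, hb⟩
          · exact Or.inl h
          · exact Or.inr ⟨r, rs, hr, by rw [hb, hbx]; rfl⟩)]
        by_cases hch : pvChunk (x :: xs.takeWhile p) ≠ [] <;> simp [hch]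

-- ===== VERDICT (by name: the statement is the Claim_ definition above) =====
theorem split_on_spec : Claim_equal_split_on := by
  intro text splitters _
  unfold Spec_split_on
  have hA := pvA_loop (pvBoundary splitters) (PySem.Chars.splitlines text.toList) [] []
  have hB := pvB_loop (pvBoundary splitters) (PySem.Chars.splitlines text.toList).length
    (PySem.Chars.splitlines text.toList) le_rfl []
  simp only [pvBoundary, pvSk, pvChunk, List.nil_append] at hA hB
  exact congrArg (List.map String.ofList) (hA.trans hB.symm)
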